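-- pv_equiv track=rewrite | github.com/LeviMayer/Project2 | app/lineheatmap2/dataset.py | _group_point_records_by_line
-- ===== SOURCE A (Python) =====
-- from typing import Dict, List, Tuple, Optional
--
-- def _group_point_records_by_line(
--
--     point_records: List[Dict[str, int]],
-- ) -> Dict[int, List[Tuple[int, int]]]:
--     by_line: Dict[int, List[Tuple[int, int]]] = {}
--     for p in point_records:
--         line_id = int(p["line_id"])
--         by_line.setdefault(line_id, []).append((int(p["px"]), int(p["py"])))
--
--     for line_id in by_line:
--         by_line[line_id] = sorted(by_line[line_id], key=lambda t: t[0])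
--
--     return by_line
-- ===== SOURCE B (Python) =====
-- def _group_point_records_by_line(point_records):
--     # One global stable sort by px, then one filter per distinct line id:
--     # stability makes each bucket come out sorted with A's exact tie order.
--     flat = sorted(
--         ((int(p["line_id"]), int(p["px"]), int(p["py"])) for p in point_records),
--         key=lambda t: t[1],
--     )
--     order = dict.fromkeys(int(p["line_id"]) for p in point_records)
--     return {lid: [(px, py) for l, px, py in flat if l == lid] for lid in order}
-- ===== Notes on version B (the rewrite author's own statement) =====
-- stated objective: alternative
-- what changed: Replaces per-group sorting (dict of buckets, then sorted() on each bucket) by one global stable sort of flat (line_id, px, py) tuples followed by a per-distinct-line filter; stability of the global sort makes each bucket come out already sorted with identical tie order, and dict.fromkeys restores first-appearance key order.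
import Mathlib
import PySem

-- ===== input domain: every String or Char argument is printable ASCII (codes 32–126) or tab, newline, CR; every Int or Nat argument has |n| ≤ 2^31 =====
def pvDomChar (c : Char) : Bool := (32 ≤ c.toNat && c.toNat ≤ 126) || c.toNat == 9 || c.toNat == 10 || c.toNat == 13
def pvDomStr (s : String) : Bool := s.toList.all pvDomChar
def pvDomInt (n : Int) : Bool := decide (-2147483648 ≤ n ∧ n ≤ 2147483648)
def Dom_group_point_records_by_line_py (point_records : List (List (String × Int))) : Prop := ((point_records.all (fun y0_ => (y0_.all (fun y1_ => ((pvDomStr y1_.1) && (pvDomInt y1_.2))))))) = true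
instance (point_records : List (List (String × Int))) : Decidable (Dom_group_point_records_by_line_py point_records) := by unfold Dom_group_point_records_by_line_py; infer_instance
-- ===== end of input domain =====

-- B replaces A's per-bucket sorts by ONE global stable sort of (line_id, px, py)
-- tuples followed by a per-distinct-line filter; same cost class ("alternative").
-- Equivalence of the RETURN value is proved on Pre_ (every record has the three keys).

-- p["k"] on an assoc-list record, total form; Pre_ guarantees the key is present
def pvLookup (p : List (String × Int)) (k : String) : Int := (p.lookup k).getD 0

-- ===== PORT A =====
def group_point_records_by_line_py (point_records : List (List (String × Int))) : List (Int × List (Int × Int)) :=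
  let by_line : PySem.Dict Int (List (Int × Int)) :=
    point_records.foldl (fun d p =>
      d.modify (pvLookup p "line_id") []
        (fun l => l ++ [(pvLookup p "px", pvLookup p "py")])) PySem.Dict.empty
  let final : PySem.Dict Int (List (Int × Int)) :=
    by_line.keys.foldl (fun d line_id =>
      d.insert line_id (PySem.List.sorted (d.getD line_id []) (fun t => t.1) false)) by_line
  final.items

-- ===== PORT B =====
def group_point_records_by_line_py_alt (point_records : List (List (String × Int))) : List (Int × List (Int × Int)) :=
  let flat : List (Int × Int × Int) :=
    PySem.List.sorted
      (point_records.map (fun p => (pvLookup p "line_id", pvLookup p "px", pvLookup p "py")))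
      (fun t => t.2.1) false
  let order : List Int := PySem.List.dedup (point_records.map (fun p => pvLookup p "line_id"))
  order.map (fun lid =>
    (lid, (flat.filter (fun t => t.1 == lid)).map (fun t => (t.2.1, t.2.2))))

-- ===== PRECONDITION & SPEC =====
-- Pre_: every record carries the keys "line_id", "px", "py" — exactly where Python A
-- does not raise KeyError.
def Pre_group_point_records_by_line_py (point_records : List (List (String × Int))) : Prop :=
  ∀ p ∈ point_records,
    (p.lookup "line_id").isSome ∧ (p.lookup "px").isSome ∧ (p.lookup "py").isSome
-- (keys are exact and case-sensitive: a record carrying "Px" instead of "px" is outside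
-- Pre_ — Python A raises KeyError on it)
instance (point_records : List (List (String × Int))) : Decidable (Pre_group_point_records_by_line_py point_records) := by unfold Pre_group_point_records_by_line_py; infer_instance
def pvWitness_group_point_records_by_line_py : (List (List (String × Int))) :=
  [[("line_id", 5), ("px", -4), ("py", 11)], [("line_id", 5), ("px", -4), ("py", 2)]]
def Spec_group_point_records_by_line_py (point_records : List (List (String × Int))) (out : List (Int × List (Int × Int))) : Prop := out = group_point_records_by_line_py_alt point_records
instance (point_records : List (List (String × Int))) (out : List (Int × List (Int × Int))) : Decidable (Spec_group_point_records_by_line_py point_records out) := by unfold Spec_group_point_records_by_line_py; infer_instance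

-- ===== CLAIM (what is proved, stated in full; the proofs are below) =====
def Claim_equal_group_point_records_by_line_py : Prop := ∀ (point_records : List (List (String × Int))), Dom_group_point_records_by_line_py point_records → Pre_group_point_records_by_line_py point_records → Spec_group_point_records_by_line_py point_records (group_point_records_by_line_py point_records)

-- ===== LEMMAS AND PROOFS =====

-- Filtering commutes with insertion into a key-sorted list (core of stable-sort/filter
-- commutation).
theorem pv_filter_insertBy {α κ : Type} [LinearOrder κ] (key : α → κ) (p : α → Bool)
    (x : α) (ys : List α) (hs : ys.Pairwise (fun a b => key a ≤ key b)) :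
    (PySem.List.insertBy (fun a b => decide (key a < key b)) x ys).filter p
      = if p x then PySem.List.insertBy (fun a b => decide (key a < key b)) x (ys.filter p)
        else ys.filter p := by
  induction ys with
  | nil => by_cases hpx : p x <;> simp [PySem.List.insertBy, hpx]
  | cons y ys ih =>
    have hs' := hs.tail
    have hy : ∀ z ∈ ys, key y ≤ key z := fun z hz => (List.pairwise_cons.mp hs).1 z hz
    by_cases hxy : key x < key y
    · -- x goes in front; every kept element of y::ys has key ≥ key y > key x
      have : PySem.List.insertBy (fun a b => decide (key a < key b)) x (y :: ys) = x :: y :: ys := by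
        simp [PySem.List.insertBy, hxy]
      rw [this]
      by_cases hpx : p x
      · have hfront : ∀ zs, (∀ z ∈ zs, key x < key z) →
            PySem.List.insertBy (fun a b => decide (key a < key b)) x zs = x :: zs := by
          intro zs hz
          cases zs with
          | nil => simp [PySem.List.insertBy]
          | cons z zs => simp [PySem.List.insertBy, hz z (by simp)]
        rw [List.filter_cons_of_pos hpx, if_pos hpx,
          hfront ((y :: ys).filter p) (by
            intro z hz
            have hzm := List.mem_of_mem_filter hz
            rcases List.mem_cons.mp hzm with h | h
            · exact h ▸ hxy
            · exact lt_of_lt_of_le hxy (hy z h))]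
      · simp [hpx]
    · -- x goes behind y
      have : PySem.List.insertBy (fun a b => decide (key a < key b)) x (y :: ys)
          = y :: PySem.List.insertBy (fun a b => decide (key a < key b)) x ys := by
        simp [PySem.List.insertBy, hxy]
      rw [this]
      by_cases hpy : p y
      · rw [List.filter_cons_of_pos hpy, ih hs']
        by_cases hpx : p x
        · rw [if_pos hpx, if_pos hpx, List.filter_cons_of_pos hpy]
          simp [PySem.List.insertBy, hxy]
        · simp [hpx, List.filter_cons_of_pos hpy]
      · rw [List.filter_cons_of_neg hpy, ih hs']
        by_cases hpx : p x
        · simp [hpx, List.filter_cons_of_neg hpy]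
        · simp [hpx, List.filter_cons_of_neg hpy]

-- A stable sort commutes with filtering.
theorem pv_filter_sorted {α κ : Type} [LinearOrder κ] (key : α → κ) (p : α → Bool)
    (xs : List α) :
    (PySem.List.sorted xs key false).filter p = PySem.List.sorted (xs.filter p) key false := by
  induction xs using List.reverseRecOn with
  | nil => simp [PySem.List.sorted_eq_foldl_insertBy]
  | append_singleton xs x ih =>
    rw [PySem.List.sorted_eq_foldl_insertBy (xs ++ [x]), List.foldl_append,
      ← PySem.List.sorted_eq_foldl_insertBy xs]
    simp only [List.foldl_cons, List.foldl_nil]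
    rw [pv_filter_insertBy key p x _ (PySem.List.sorted_pairwise xs key), ih,
      List.filter_append]
    by_cases hpx : p x
    · rw [if_pos hpx]
      simp only [List.filter_cons_of_pos hpx, List.filter_nil]
      rw [PySem.List.sorted_eq_foldl_insertBy (xs.filter p ++ [x]), List.foldl_append,
        ← PySem.List.sorted_eq_foldl_insertBy (xs.filter p)]
      simp
    · rw [if_neg hpx]
      simp [List.filter_cons_of_neg hpx]

-- Sorting a mapped list is mapping the sorted source (key composed through the map).
theorem pv_insertBy_map {α β κ : Type} [LinearOrder κ] (key : β → κ) (f : α → β)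
    (x : α) (ys : List α) :
    PySem.List.insertBy (fun a b => decide (key a < key b)) (f x) (ys.map f)
      = (PySem.List.insertBy (fun a b => decide (key (f a) < key (f b))) x ys).map f := by
  induction ys with
  | nil => simp [PySem.List.insertBy]
  | cons y ys ih =>
    by_cases h : key (f x) < key (f y)
    · simp [PySem.List.insertBy, h]
    · simp [PySem.List.insertBy, h, ih]

theorem pv_sorted_map {α β κ : Type} [LinearOrder κ] (key : β → κ) (f : α → β)
    (xs : List α) :
    PySem.List.sorted (xs.map f) key false
      = (PySem.List.sorted xs (fun x => key (f x)) false).map f := by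
  induction xs using List.reverseRecOn with
  | nil => simp [PySem.List.sorted_eq_foldl_insertBy]
  | append_singleton xs x ih =>
    rw [List.map_append]
    simp only [List.map_cons, List.map_nil]
    rw [PySem.List.sorted_eq_foldl_insertBy (xs.map f ++ [f x]),
      List.foldl_append, ← PySem.List.sorted_eq_foldl_insertBy (xs.map f),
      PySem.List.sorted_eq_foldl_insertBy (xs ++ [x]), List.foldl_append,
      ← PySem.List.sorted_eq_foldl_insertBy xs]
    simp only [List.foldl_cons, List.foldl_nil]
    rw [ih, pv_insertBy_map]

-- A's second loop: re-inserting every existing key with a transformed value keeps the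
-- keys and transforms exactly the values at keys of the processed list.
theorem pv_loop2 (g : List (Int × Int) → List (Int × Int)) :
    ∀ (ks : List Int) (d : PySem.Dict Int (List (Int × Int))),
      ks.Nodup → (∀ k ∈ ks, d.contains k = true) →
      (ks.foldl (fun d k => d.insert k (g (d.getD k []))) d).keys = d.keys ∧
      (∀ j, (ks.foldl (fun d k => d.insert k (g (d.getD k []))) d).getD j []
          = if j ∈ ks then g (d.getD j []) else d.getD j []) := by
  intro ks
  induction ks with
  | nil => intro d _ _; simp
  | cons k ks ih =>
    intro d hnd hc
    have hck : d.contains k = true := hc k (by simp)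
    set d' := d.insert k (g (d.getD k [])) with hd'
    have hkeys' : d'.keys = d.keys := PySem.Dict.keys_insert_of_contains d _ hck
    have hc' : ∀ j ∈ ks, d'.contains j = true := by
      intro j hj
      rw [PySem.Dict.contains_iff_mem_keys, hkeys', ← PySem.Dict.contains_iff_mem_keys]
      exact hc j (by simp [hj])
    obtain ⟨hK, hG⟩ := ih d' (hnd.of_cons) hc'
    have hknotin : k ∉ ks := (List.nodup_cons.mp hnd).1
    constructor
    · rw [List.foldl_cons]; exact hK.trans hkeys'
    · intro j
      rw [List.foldl_cons]
      rw [hG j]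
      by_cases hjks : j ∈ ks
      · have hjk : j ≠ k := fun h => hknotin (h ▸ hjks)
        simp [hjks, hd', PySem.Dict.getD_insert_of_ne d _ _ hjk]
      · by_cases hjk : j = k
        · subst hjk
          simp [hjks, hd', PySem.Dict.getD_insert_self]
        · simp [hjks, hjk, hd', PySem.Dict.getD_insert_of_ne d _ _ hjk]

-- canonical form both programs reduce to
theorem pv_A_canon (pr : List (List (String × Int))) :
    group_point_records_by_line_py pr
      = (PySem.List.dedup (pr.map (fun p => pvLookup p "line_id"))).map (fun k =>
          (k, PySem.List.sorted
                ((pr.filter (fun p => pvLookup p "line_id" == k)).map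
                  (fun p => (pvLookup p "px", pvLookup p "py")))
                (fun t => t.1) false)) := by
  unfold group_point_records_by_line_py
  simp only []
  set by_line : PySem.Dict Int (List (Int × Int)) :=
    pr.foldl (fun d p =>
      d.modify (pvLookup p "line_id") []
        (fun l => l ++ [(pvLookup p "px", pvLookup p "py")])) PySem.Dict.empty with hbl
  have hkeys : by_line.keys = PySem.List.dedup (pr.map (fun p => pvLookup p "line_id")) := by
    rw [hbl, PySem.Dict.keys_foldl_modify_key pr (fun p => pvLookup p "line_id") []
      (fun d p => (fun l => l ++ [(pvLookup p "px", pvLookup p "py")])) PySem.Dict.empty]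
    rw [PySem.List.dedup_eq_ofList]
    rfl
  have hnd : by_line.keys.Nodup := by
    rw [hkeys]; exact PySem.List.nodup_dedup _
  have hgetD : ∀ k, by_line.getD k []
      = (pr.filter (fun p => pvLookup p "line_id" == k)).map
          (fun p => (pvLookup p "px", pvLookup p "py")) := by
    intro k
    rw [hbl, show pr.foldl (fun d p =>
        d.modify (pvLookup p "line_id") []
          (fun l => l ++ [(pvLookup p "px", pvLookup p "py")])) PySem.Dict.empty
      = (pr.map (fun p => (pvLookup p "line_id", (pvLookup p "px", pvLookup p "py")))).foldl
          (fun d q => d.modify q.1 [] (fun l => l ++ [q.2])) PySem.Dict.empty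
      by rw [List.foldl_map]]
    rw [PySem.Dict.getD_foldl_modify_append]
    rw [List.filter_map, List.map_map]
    simp [Function.comp_def]
  have hcont : ∀ k ∈ by_line.keys, by_line.contains k = true := by
    intro k hk; exact (PySem.Dict.contains_iff_mem_keys by_line k).mpr hk
  obtain ⟨hK, hG⟩ := pv_loop2 (fun l => PySem.List.sorted l (fun t => t.1) false)
    by_line.keys by_line hnd hcont
  set final := by_line.keys.foldl (fun d line_id =>
    d.insert line_id (PySem.List.sorted (d.getD line_id []) (fun t => t.1) false)) by_line with hf
  have hndf : final.keys.Nodup := by rw [hf, hK]; exact hnd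
  rw [PySem.Dict.items_eq_map_keys final hndf []]
  rw [hf, hK, ← hkeys]
  refine List.map_congr_left ?_
  intro k hk
  rw [hG k, if_pos (by rw [hkeys] at hk ⊢; exact hk), hgetD k]

theorem pv_B_canon (pr : List (List (String × Int))) :
    group_point_records_by_line_py_alt pr
      = (PySem.List.dedup (pr.map (fun p => pvLookup p "line_id"))).map (fun k =>
          (k, PySem.List.sorted
                ((pr.filter (fun p => pvLookup p "line_id" == k)).map
                  (fun p => (pvLookup p "px", pvLookup p "py")))
                (fun t => t.1) false)) := by
  unfold group_point_records_by_line_py_alt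
  simp only []
  refine List.map_congr_left ?_
  intro k hk
  rw [pv_filter_sorted (fun t : Int × Int × Int => t.2.1) (fun t => t.1 == k)]
  rw [List.filter_map]
  rw [pv_sorted_map (fun t : Int × Int × Int => t.2.1)
    (fun p => (pvLookup p "line_id", pvLookup p "px", pvLookup p "py"))]
  rw [pv_sorted_map (fun t : Int × Int => t.1)
    (fun p => (pvLookup p "px", pvLookup p "py"))]
  simp [Function.comp_def, List.map_map]

-- ===== VERDICT (by name: the statement is the Claim_ definition above) =====
theorem group_point_records_by_line_py_spec : Claim_equal_group_point_records_by_line_py := by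
  intro pr _ _
  unfold Spec_group_point_records_by_line_py
  rw [pv_A_canon, pv_B_canon]
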